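-- pv_equiv track=rewrite | github.com/gabus/codewars | uni/palindromes_in_list.py | find_palindromes
-- ===== SOURCE A (Python) =====
-- def find_palindromes(start: int, end: int) -> list:
--     found = []
--
--     for x in range(start, end + 1):
--         if not check_palindromes(str(x)):
--             continue
--
--         if not check_palindromes(str(x * x)):
--             continue
--
--         found.append(x)
--
--     return found
--
-- def check_palindromes(number: str) -> bool:
--     return number[::-1] == number
-- ===== SOURCE B (Python) =====
-- def find_palindromes(start: int, end: int) -> list:
--     # Arithmetic digit-reversal instead of string building/slicing; negatives
--     # can never be decimal palindromes ("-..." reversed ends in '-'), so the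
--     # scan starts at max(start, 0).
--     def rev(n):
--         r = 0
--         while n > 0:
--             n, d = divmod(n, 10)
--             r = 10 * r + d
--         return r
--     return [x for x in range(max(start, 0), end + 1)
--             if rev(x) == x and rev(x * x) == x * x]
-- ===== Notes on version B (the rewrite author's own statement) =====
-- stated objective: alternative
-- what changed: B tests palindromicity by arithmetic digit reversal (divmod accumulator loop) instead of building str(x) and comparing with its [::-1] slice, and starts the scan at max(start, 0) since no negative number's decimal string is a palindrome.
import Mathlib
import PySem

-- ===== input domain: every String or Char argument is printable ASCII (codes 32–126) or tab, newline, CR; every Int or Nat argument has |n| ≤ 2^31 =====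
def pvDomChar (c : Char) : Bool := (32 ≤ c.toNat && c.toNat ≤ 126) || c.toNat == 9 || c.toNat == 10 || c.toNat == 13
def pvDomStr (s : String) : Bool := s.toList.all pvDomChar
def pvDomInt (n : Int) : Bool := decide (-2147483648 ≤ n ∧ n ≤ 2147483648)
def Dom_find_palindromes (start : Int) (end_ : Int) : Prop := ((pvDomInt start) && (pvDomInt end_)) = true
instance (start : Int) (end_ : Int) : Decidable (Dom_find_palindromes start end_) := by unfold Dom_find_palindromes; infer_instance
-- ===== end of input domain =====

-- B replaces A's per-number string building and slice reversal with arithmetic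
-- digit reversal and starts the scan at max(start, 0), since no negative number
-- is a decimal palindrome; same return value, different mechanism.

-- ===== PORT A =====
-- number[::-1] == number; step -1 never raises, so slice?'s Option is unwrapped with getD
def check_palindromes (number : String) : Bool :=
  ((PySem.Str.slice? number none none (-1)).getD "") == number

def find_palindromes (start : Int) (end_ : Int) : List Int :=
  (PySem.List.pyRange start (end_ + 1) 1).foldl
    (fun found x =>
      if !check_palindromes (PySem.Int.toStr x) then found
      else if !check_palindromes (PySem.Int.toStr (x * x)) then found
      else found ++ [x]) []

-- ===== PORT B =====
-- Source B's `rev` while-loop; the fuel argument only bounds the iteration count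
-- (n.toNat iterations always suffice because `n` strictly shrinks under // 10)
def pvRevAux : Nat → Int → Int → Int
  | 0, _, r => r
  | fuel + 1, n, r =>
    if 0 < n then pvRevAux fuel (PySem.Int.floordiv n 10) (10 * r + PySem.Int.mod n 10) else r

def pvRev (n : Int) : Int := pvRevAux n.toNat n 0

def find_palindromes_alt (start : Int) (end_ : Int) : List Int :=
  (PySem.List.pyRange (max start 0) (end_ + 1) 1).filter
    (fun x => pvRev x == x && pvRev (x * x) == x * x)

-- ===== PRECONDITION & SPEC =====
def Spec_find_palindromes (start : Int) (end_ : Int) (out : List Int) : Prop := out = find_palindromes_alt start end_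
instance (start : Int) (end_ : Int) (out : List Int) : Decidable (Spec_find_palindromes start end_ out) := by unfold Spec_find_palindromes; infer_instance

-- ===== CLAIM (what is proved, stated in full; the proofs are below) =====
def Claim_equal_find_palindromes : Prop := ∀ (start : Int) (end_ : Int), Dom_find_palindromes start end_ → Spec_find_palindromes start end_ (find_palindromes start end_)

-- ===== LEMMAS AND PROOFS =====

-- `Nat.toDigits 10 n` (what `str` prints for n ≥ 0) is the decimal digit list of n,
-- most significant first.
theorem pvToDigitsCore_eq (f : Nat) : ∀ (n : Nat) (acc : List Char), n < f →
    Nat.toDigitsCore 10 f n acc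
      = (if n = 0 then ['0'] else ((Nat.digits 10 n).map Nat.digitChar).reverse) ++ acc := by
  induction f with
  | zero => intro n acc h; omega
  | succ f ih =>
    intro n acc h
    by_cases hn : n = 0
    · subst hn; simp [Nat.toDigitsCore]; decide
    · have hds : Nat.digits 10 n = n % 10 :: Nat.digits 10 (n / 10) :=
        Nat.digits_def' (by omega) (by omega)
      by_cases hq : n / 10 = 0
      · have h10 : n < 10 := by omega
        have hnil : Nat.digits 10 (n / 10) = [] := by rw [hq]; simp
        simp [Nat.toDigitsCore, hn, h10, Nat.mod_eq_of_lt h10]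
      · have hlt : n / 10 < f := by omega
        have := ih (n / 10) (Nat.digitChar (n % 10) :: acc) hlt
        simp only [Nat.toDigitsCore, hq, ite_false]
        rw [this]
        simp [hn, hds, hq]

theorem pvToDigits_eq (n : Nat) :
    Nat.toDigits 10 n
      = if n = 0 then ['0'] else ((Nat.digits 10 n).map Nat.digitChar).reverse := by
  have := pvToDigitsCore_eq (n + 1) n [] (by omega)
  simpa [Nat.toDigits] using this

theorem pvDigitChar_ne_dash {d : Nat} (h : d < 10) : Nat.digitChar d ≠ '-' := by
  interval_cases d <;> decide

theorem pvDigitChar_inj {d₁ d₂ : Nat} (h₁ : d₁ < 10) (h₂ : d₂ < 10)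
    (h : Nat.digitChar d₁ = Nat.digitChar d₂) : d₁ = d₂ := by
  interval_cases d₁ <;> interval_cases d₂ <;> revert h <;> decide

theorem pvMapDigitChar_inj : ∀ (l₁ l₂ : List Nat), (∀ d ∈ l₁, d < 10) → (∀ d ∈ l₂, d < 10) →
    l₁.map Nat.digitChar = l₂.map Nat.digitChar → l₁ = l₂ := by
  intro l₁
  induction l₁ with
  | nil => intro l₂ _ _ h; cases l₂ <;> simp_all
  | cons a t ih =>
    intro l₂ h₁ h₂ h
    cases l₂ with
    | nil => simp_all
    | cons b t₂ =>
      simp only [List.map_cons, List.cons.injEq] at h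
      have hab := pvDigitChar_inj (h₁ a (by simp)) (h₂ b (by simp)) h.1
      have := ih t₂ (fun d hd => h₁ d (by simp [hd])) (fun d hd => h₂ d (by simp [hd])) h.2
      simp [hab, this]

theorem pvMem_toDigits_ne_dash {n : Nat} {c : Char} (h : c ∈ Nat.toDigits 10 n) : c ≠ '-' := by
  rw [pvToDigits_eq] at h
  by_cases hn : n = 0
  · simp [hn] at h; simp [h]
  · simp only [hn, if_false, List.mem_reverse, List.mem_map] at h
    obtain ⟨d, hd, rfl⟩ := h
    exact pvDigitChar_ne_dash (Nat.digits_lt_base (by omega) hd)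

theorem pvToDigits_ne_nil (n : Nat) : Nat.toDigits 10 n ≠ [] := by
  rw [pvToDigits_eq]
  by_cases hn : n = 0
  · simp [hn]
  · have : Nat.digits 10 n ≠ [] := Nat.digits_ne_nil_iff_ne_zero.mpr hn
    simp [hn, this]

theorem pvCheck_eq (s : String) :
    check_palindromes s = decide (s.toList.reverse = s.toList) := by
  unfold check_palindromes
  rw [PySem.Str.slice?_none_none_neg_one]
  rcases Bool.eq_false_or_eq_true (String.ofList s.toList.reverse == s) with h | h <;>
    simp_all [String.ofList_eq]

-- a negative number's string starts with '-' and ends with a digit, so it is never a palindrome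
theorem pvCheck_toStr_neg {x : Int} (h : x < 0) :
    check_palindromes (PySem.Int.toStr x) = false := by
  rw [pvCheck_eq, PySem.Int.toList_toStr]
  have : PySem.Int.toChars x = '-' :: Nat.toDigits 10 x.natAbs := by
    simp [PySem.Int.toChars, h]
  rw [this]
  simp only [decide_eq_false_iff_not]
  intro hpal
  have hlast : (Nat.toDigits 10 x.natAbs).reverse ++ ['-'] = '-' :: Nat.toDigits 10 x.natAbs := by
    simpa using hpal
  have hne := pvToDigits_ne_nil x.natAbs
  have hgl : ((Nat.toDigits 10 x.natAbs).reverse ++ ['-']).getLast? = some '-' := by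
    simp
  rw [hlast] at hgl
  have hgl2 : ('-' :: Nat.toDigits 10 x.natAbs).getLast? = (Nat.toDigits 10 x.natAbs).getLast? := by
    cases hcase : Nat.toDigits 10 x.natAbs with
    | nil => exact absurd hcase hne
    | cons a t => simp [List.getLast?_cons_cons]
  rw [hgl2] at hgl
  have : '-' ∈ Nat.toDigits 10 x.natAbs := by
    have := List.getLast?_eq_some_iff.mp hgl
    obtain ⟨l, hl⟩ := this
    simp [hl]
  exact pvMem_toDigits_ne_dash this rfl

-- for x ≥ 0, A's string test is palindromicity of the decimal digit list
theorem pvCheck_toStr_nonneg {x : Int} (h : 0 ≤ x) :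
    check_palindromes (PySem.Int.toStr x)
      = decide ((Nat.digits 10 x.toNat).reverse = Nat.digits 10 x.toNat) := by
  rw [pvCheck_eq, PySem.Int.toList_toStr]
  have hx : PySem.Int.toChars x = Nat.toDigits 10 x.toNat := by
    simp [PySem.Int.toChars, not_lt.mpr h]
  rw [hx, pvToDigits_eq]
  by_cases hn : x.toNat = 0
  · simp [hn]
  · simp only [hn, if_false, List.reverse_reverse]
    have hiff : (Nat.digits 10 x.toNat).map Nat.digitChar
        = ((Nat.digits 10 x.toNat).map Nat.digitChar).reverse
        ↔ (Nat.digits 10 x.toNat).reverse = Nat.digits 10 x.toNat := by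
      rw [← List.map_reverse]
      constructor
      · intro hm
        have := pvMapDigitChar_inj _ _
          (fun d hd => Nat.digits_lt_base (by omega) hd)
          (fun d hd => Nat.digits_lt_base (by omega) (List.mem_reverse.mp hd)) hm
        exact this.symm
      · intro hm; rw [hm]
    exact decide_eq_decide.mpr hiff

-- B's reversal loop computes the number read off the reversed digit list
theorem pvRevAux_spec : ∀ (fuel n r : Nat), (Nat.digits 10 n).length ≤ fuel →
    pvRevAux fuel (n : Int) (r : Int)
      = ((r * 10 ^ (Nat.digits 10 n).length + Nat.ofDigits 10 (Nat.digits 10 n).reverse : Nat) : Int) := by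
  intro fuel
  induction fuel with
  | zero =>
    intro n r h
    have : Nat.digits 10 n = [] := List.length_eq_zero_iff.mp (by omega)
    have hn : n = 0 := Nat.digits_eq_nil_iff_eq_zero.mp this
    subst hn
    simp [pvRevAux, this]
  | succ fuel ih =>
    intro n r h
    by_cases hn : n = 0
    · subst hn; simp [pvRevAux]
    · have hds : Nat.digits 10 n = n % 10 :: Nat.digits 10 (n / 10) :=
        Nat.digits_def' (by omega) (by omega)
      have hlen : (Nat.digits 10 (n / 10)).length ≤ fuel := by
        rw [hds] at h; simpa using h
      have hpos : (0 : Int) < (n : Int) := by exact_mod_cast Nat.pos_of_ne_zero hn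
      have hstep : pvRevAux (fuel + 1) (n : Int) (r : Int)
          = pvRevAux fuel ((n / 10 : Nat) : Int) ((10 * r + n % 10 : Nat) : Int) := by
        simp only [pvRevAux, if_pos hpos]
        norm_num
      rw [hstep, ih _ _ hlen, hds]
      have hofd : Nat.ofDigits 10 ((n % 10 :: Nat.digits 10 (n / 10)).reverse)
          = Nat.ofDigits 10 (Nat.digits 10 (n / 10)).reverse
            + 10 ^ (Nat.digits 10 (n / 10)).length * (n % 10) := by
        rw [List.reverse_cons, Nat.ofDigits_append]
        simp [Nat.ofDigits]
      push_cast [hofd]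
      simp only [List.length_cons, pow_succ]
      ring

theorem pvRev_eq_beq {x : Int} (h : 0 ≤ x) :
    (pvRev x == x) = decide ((Nat.digits 10 x.toNat).reverse = Nat.digits 10 x.toNat) := by
  obtain ⟨m, rfl⟩ := Int.eq_ofNat_of_zero_le h
  have hlen : (Nat.digits 10 m).length ≤ m :=
    (Nat.digits_length_le_iff (by omega) m).mpr (Nat.lt_pow_self (by omega))
  have hrev : pvRev (m : Int) = ((Nat.ofDigits 10 (Nat.digits 10 m).reverse : Nat) : Int) := by
    unfold pvRev
    have htn : ((m : Int)).toNat = m := by simp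
    rw [htn]
    have := pvRevAux_spec m m 0 hlen
    simpa using this
  have hiff : (pvRev (m : Int) = (m : Int)) ↔ (Nat.digits 10 m).reverse = Nat.digits 10 m := by
    rw [hrev]
    constructor
    · intro heq
      have hofd : Nat.ofDigits 10 (Nat.digits 10 m).reverse = m := by exact_mod_cast heq
      refine Nat.ofDigits_inj_of_len_eq (by omega) (by simp)
        (fun d hd => Nat.digits_lt_base (by omega) (List.mem_reverse.mp hd))
        (fun d hd => Nat.digits_lt_base (by omega) hd) ?_
      rw [hofd, Nat.ofDigits_digits]
    · intro heq
      rw [heq, Nat.ofDigits_digits]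
  rcases Bool.eq_false_or_eq_true (pvRev (m : Int) == (m : Int)) with hb | hb <;> simp_all

-- pointwise agreement of the two filters on nonnegative x
theorem pvPred_eq {x : Int} (h : 0 ≤ x) :
    (check_palindromes (PySem.Int.toStr x) && check_palindromes (PySem.Int.toStr (x * x)))
      = (pvRev x == x && pvRev (x * x) == x * x) := by
  rw [pvCheck_toStr_nonneg h, pvCheck_toStr_nonneg (mul_nonneg h h),
    pvRev_eq_beq h, pvRev_eq_beq (mul_nonneg h h)]

theorem pvA_filter (start end_ : Int) :
    find_palindromes start end_
      = (PySem.List.pyRange start (end_ + 1) 1).filter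
          (fun x => check_palindromes (PySem.Int.toStr x)
            && check_palindromes (PySem.Int.toStr (x * x))) := by
  unfold find_palindromes
  have hfun : (fun (found : List Int) (x : Int) =>
      if !check_palindromes (PySem.Int.toStr x) then found
      else if !check_palindromes (PySem.Int.toStr (x * x)) then found
      else found ++ [x])
    = (fun (found : List Int) (x : Int) =>
      if (check_palindromes (PySem.Int.toStr x)
            && check_palindromes (PySem.Int.toStr (x * x))) = true
      then found ++ [id x] else found) := by
    funext found x
    cases h₁ : check_palindromes (PySem.Int.toStr x) <;>
      cases h₂ : check_palindromes (PySem.Int.toStr (x * x)) <;> simp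
  rw [hfun, PySem.List.foldl_append_if]
  simp

theorem pvNeg_filter (a b : Int) (hb : b ≤ 0) :
    (PySem.List.pyRange a b 1).filter
      (fun x => check_palindromes (PySem.Int.toStr x)
        && check_palindromes (PySem.Int.toStr (x * x))) = [] := by
  apply List.filter_eq_nil_iff.mpr
  intro x hx
  have := PySem.List.mem_pyRange_one.mp hx
  have hneg : x < 0 := by omega
  simp [pvCheck_toStr_neg hneg]

-- ===== VERDICT (by name: the statement is the Claim_ definition above) =====
theorem find_palindromes_spec : Claim_equal_find_palindromes := by
  intro start end_ _
  unfold Spec_find_palindromes find_palindromes_alt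
  rw [pvA_filter]
  by_cases hs : start ≤ 0
  · rw [max_eq_right hs]
    by_cases he : end_ + 1 ≤ 0
    · rw [pvNeg_filter start (end_ + 1) he, PySem.List.pyRange_one_eq_nil (by omega)]
      simp
    · push Not at he
      rw [PySem.List.pyRange_one_append start 0 (end_ + 1) hs (by omega), List.filter_append,
        pvNeg_filter start 0 le_rfl, List.nil_append]
      apply List.filter_congr
      intro x hx
      have := PySem.List.mem_pyRange_one.mp hx
      exact pvPred_eq this.1
  · push Not at hs
    rw [max_eq_left (by omega)]
    apply List.filter_congr
    intro x hx
    have := PySem.List.mem_pyRange_one.mp hx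
    exact pvPred_eq (by omega)
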